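-- pv_equiv track=rewrite | github.com/Relic-Studios/engram | engram/consolidation/consolidator.py | _extractive_arc_summary
-- ===== SOURCE A (Python) =====
-- from typing import TYPE_CHECKING, Dict, List, Optional, Set, Tuple
--
-- def _extractive_arc_summary(threads: List[Dict], person: str) -> str:
--     """Fallback: concatenate thread summaries chronologically."""
--     sorted_threads = sorted(threads, key=lambda t: t.get("created", ""))
--     lines = []
--     for t in sorted_threads:
--         content = t.get("content", "")
--         if len(content) > 300:
--             content = content[:300] + "..."
--         lines.append(f"- {content}")
--
--     time_range = _time_range(threads)
--     header = f"Arc with {person} ({time_range}):"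
--     return header + "\n" + "\n".join(lines)
--
-- def _time_range(traces: List[Dict]) -> str:
--     """Return 'first_ts to last_ts' from a list of traces."""
--     if not traces:
--         return ""
--     times = [t.get("created", "") for t in traces if t.get("created")]
--     if not times:
--         return ""
--     times.sort()
--     return f"{times[0]} to {times[-1]}"
-- ===== SOURCE B (Python) =====
-- def _extractive_arc_summary(threads, person):
--     """Single pass over the chronologically sorted threads: build each truncated
--     '- content' line and accumulate the min/max non-empty 'created' timestamp
--     inline, so no separate _time_range helper and no second sort is needed."""
--     lines = []
--     lo = None
--     hi = None
--     for t in sorted(threads, key=lambda t: t.get("created", "")):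
--         content = t.get("content", "")
--         if len(content) > 300:
--             content = content[:300] + "..."
--         lines.append("- " + content)
--         ts = t.get("created", "")
--         if ts:
--             if lo is None or ts < lo:
--                 lo = ts
--             if hi is None or hi < ts:
--                 hi = ts
--     time_range = "" if lo is None else lo + " to " + hi
--     return "Arc with " + person + " (" + time_range + "):\n" + "\n".join(lines)
-- ===== Notes on version B (the rewrite author's own statement) =====
-- stated objective: simpler
-- what changed: B folds once over the sorted threads, building each truncated line and accumulating the min/max non-empty 'created' timestamp inline, eliminating the separate _time_range helper with its second list pass and sort.
import Mathlib
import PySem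

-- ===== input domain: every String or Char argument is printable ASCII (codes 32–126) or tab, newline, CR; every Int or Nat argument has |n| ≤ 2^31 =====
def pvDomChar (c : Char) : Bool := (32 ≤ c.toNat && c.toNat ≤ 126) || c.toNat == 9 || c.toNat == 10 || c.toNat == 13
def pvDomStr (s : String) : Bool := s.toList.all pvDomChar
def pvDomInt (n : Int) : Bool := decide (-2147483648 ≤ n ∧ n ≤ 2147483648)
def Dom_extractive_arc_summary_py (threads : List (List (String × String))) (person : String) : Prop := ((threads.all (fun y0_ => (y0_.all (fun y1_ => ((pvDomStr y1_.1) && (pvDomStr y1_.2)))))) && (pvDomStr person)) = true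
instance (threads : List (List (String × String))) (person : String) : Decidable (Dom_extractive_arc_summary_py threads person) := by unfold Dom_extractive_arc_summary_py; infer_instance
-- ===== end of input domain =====

-- B replaces A's separate _time_range helper (second pass + second sort) by accumulating the
-- min/max non-empty 'created' timestamp inline in the single line-building loop (objective: simpler).

-- ===== PORT A =====
-- t.get(k, d) on a thread dict (shared by both ports, as both Pythons call .get the same way)
def pvGet (t : List (String × String)) (k d : String) : String :=
  PySem.Dict.getD (PySem.Dict.ofList t) k d

-- the truncated "- content" line for one thread (same code in both Pythons)
def pvLine (t : List (String × String)) : String :=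
  let content := pvGet t "content" ""
  let content := if 300 < PySem.Str.len content
                 then PySem.Str.slice content none (some 300) ++ "..." else content
  "- " ++ content

-- port of _time_range; 'if t.get("created")' (truthiness) is rendered as getD "created" "" ≠ ""
def time_range_py (traces : List (List (String × String))) : String :=
  if traces = [] then ""
  else
    let times := (traces.filter (fun t => pvGet t "created" "" ≠ "")).map
                   (fun t => pvGet t "created" "")
    if times = [] then ""
    else
      let times := PySem.List.sorted times (fun x => x) false
      PySem.List.pyGetD times 0 "" ++ " to " ++ PySem.List.pyGetD times (-1) ""

def extractive_arc_summary_py (threads : List (List (String × String))) (person : String) : String :=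
  let sorted_threads := PySem.List.sorted threads (fun t => pvGet t "created" "") false
  let lines := sorted_threads.foldl (fun acc t => acc ++ [pvLine t]) []
  let time_range := time_range_py threads
  let header := "Arc with " ++ person ++ " (" ++ time_range ++ "):"
  header ++ "\n" ++ PySem.Str.join "\n" lines

-- ===== PORT B =====
-- one fold over the sorted threads: (lines, running min timestamp, running max timestamp)
def extractive_arc_summary_py_alt (threads : List (List (String × String))) (person : String) : String :=
  let st := (PySem.List.sorted threads (fun t => pvGet t "created" "") false).foldl
    (fun (s : List String × Option String × Option String) t =>
      let lines := s.1 ++ [pvLine t]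
      let ts := pvGet t "created" ""
      if ts ≠ "" then
        (lines,
         (match s.2.1 with | none => some ts | some l => if ts < l then some ts else some l),
         (match s.2.2 with | none => some ts | some h => if h < ts then some ts else some h))
      else (lines, s.2.1, s.2.2))
    ([], none, none)
  let time_range := match st.2.1, st.2.2 with
    | some l, some h => l ++ " to " ++ h
    | _, _ => ""
  "Arc with " ++ person ++ " (" ++ time_range ++ "):\n" ++ PySem.Str.join "\n" st.1

-- ===== PRECONDITION & SPEC =====
def Spec_extractive_arc_summary_py (threads : List (List (String × String))) (person : String) (out : String) : Prop := out = extractive_arc_summary_py_alt threads person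
instance (threads : List (List (String × String))) (person : String) (out : String) : Decidable (Spec_extractive_arc_summary_py threads person out) := by unfold Spec_extractive_arc_summary_py; infer_instance

-- ===== CLAIM (what is proved, stated in full; the proofs are below) =====
def Claim_equal_extractive_arc_summary_py : Prop := ∀ (threads : List (List (String × String))) (person : String), Dom_extractive_arc_summary_py threads person → Spec_extractive_arc_summary_py threads person (extractive_arc_summary_py threads person)

-- ===== LEMMAS AND PROOFS =====

-- B's triple fold splits into A's lines fold and a running min / running max over the
-- non-empty 'created' values of the traversed threads
theorem pv_fold_split (l : List (List (String × String)))
    (ls : List String) (o1 o2 : Option String) :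
    l.foldl (fun (s : List String × Option String × Option String) t =>
      let lines := s.1 ++ [pvLine t]
      let ts := pvGet t "created" ""
      if ts ≠ "" then
        (lines,
         (match s.2.1 with | none => some ts | some l => if ts < l then some ts else some l),
         (match s.2.2 with | none => some ts | some h => if h < ts then some ts else some h))
      else (lines, s.2.1, s.2.2)) (ls, o1, o2)
    = (l.foldl (fun acc t => acc ++ [pvLine t]) ls,
       ((l.filter (fun t => pvGet t "created" "" ≠ "")).map (fun t => pvGet t "created" "")).foldl
         (fun o ts => match o with
           | none => some ts | some l => if ts < l then some ts else some l) o1,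
       ((l.filter (fun t => pvGet t "created" "" ≠ "")).map (fun t => pvGet t "created" "")).foldl
         (fun o ts => match o with
           | none => some ts | some h => if h < ts then some ts else some h) o2) := by
  induction l generalizing ls o1 o2 with
  | nil => rfl
  | cons t l ih =>
      simp only [List.foldl_cons, List.filter_cons]
      by_cases h : pvGet t "created" "" = ""
      · simp only [h, ne_eq, not_true_eq_false, if_false, decide_false, Bool.false_eq_true]
        exact ih _ _ _
      · simp only [ne_eq, h, not_false_eq_true, if_true, decide_true, List.map_cons,
          List.foldl_cons]
        exact ih _ _ _

theorem pv_min_fold (ws : List String) (a : String) :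
    ws.foldl (fun o ts => match o with
      | none => some ts | some l => if ts < l then some ts else some l) (some a)
    = some (ws.foldl min a) := by
  induction ws generalizing a with
  | nil => rfl
  | cons x ws ih =>
      simp only [List.foldl_cons]
      by_cases h : x < a
      · rw [if_pos h, ih, min_eq_right h.le]
      · rw [if_neg h, ih, min_eq_left (not_lt.mp h)]

theorem pv_max_fold (ws : List String) (a : String) :
    ws.foldl (fun o ts => match o with
      | none => some ts | some h => if h < ts then some ts else some h) (some a)
    = some (ws.foldl max a) := by
  induction ws generalizing a with
  | nil => rfl
  | cons x ws ih =>
      simp only [List.foldl_cons]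
      by_cases h : a < x
      · rw [if_pos h, ih, max_eq_right h.le]
      · rw [if_neg h, ih, max_eq_left (not_lt.mp h)]

-- every member of a ≤-pairwise list is at most its last element
theorem pv_le_getLast {l : List String} (hp : l.Pairwise (· ≤ ·)) {y : String}
    (hy : y ∈ l) (h : l ≠ []) : y ≤ l.getLast h := by
  induction l with
  | nil => cases hy
  | cons a l ih =>
      rcases List.pairwise_cons.mp hp with ⟨ha, hp'⟩
      cases l with
      | nil => simp at hy; simp [hy]
      | cons b l' =>
          rw [List.getLast_cons (by simp)]
          rcases List.mem_cons.mp hy with rfl | hy'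
          · exact le_trans (ha _ (List.getLast_mem _)) le_rfl
          · exact ih hp' hy' (by simp)

-- both assemblies of the final string agree
theorem pv_assemble (p tr j : String) :
    "Arc with " ++ p ++ " (" ++ tr ++ "):" ++ "\n" ++ j
      = "Arc with " ++ p ++ " (" ++ tr ++ "):\n" ++ j := by
  congr 1
  rw [String.append_assoc]
  rfl

-- ===== VERDICT (by name: the statement is the Claim_ definition above) =====
theorem extractive_arc_summary_py_spec : Claim_equal_extractive_arc_summary_py := by
  intro threads person _
  show extractive_arc_summary_py threads person = extractive_arc_summary_py_alt threads person
  simp only [extractive_arc_summary_py, extractive_arc_summary_py_alt, pv_fold_split]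
  have hperm :
      (((PySem.List.sorted threads (fun t => pvGet t "created" "") false).filter
          (fun t => pvGet t "created" "" ≠ "")).map (fun t => pvGet t "created" "")).Perm
        ((threads.filter (fun t => pvGet t "created" "" ≠ "")).map
          (fun t => pvGet t "created" "")) :=
    ((PySem.List.sorted_perm threads (fun t => pvGet t "created" "") false).filter _).map _
  by_cases h0 : (threads.filter (fun t => pvGet t "created" "" ≠ "")).map
      (fun t => pvGet t "created" "") = []
  · have hv0 : ((PySem.List.sorted threads (fun t => pvGet t "created" "") false).filter
        (fun t => pvGet t "created" "" ≠ "")).map (fun t => pvGet t "created" "") = [] :=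
      List.Perm.eq_nil (h0 ▸ hperm)
    have htr : time_range_py threads = "" := by
      simp only [time_range_py, h0]
      split_ifs <;> rfl
    rw [hv0, htr]
    apply pv_assemble
  · have hv0 : ((PySem.List.sorted threads (fun t => pvGet t "created" "") false).filter
        (fun t => pvGet t "created" "" ≠ "")).map (fun t => pvGet t "created" "") ≠ [] :=
      fun h => h0 (List.Perm.eq_nil (h ▸ hperm.symm))
    have ht : threads ≠ [] := by rintro rfl; exact h0 rfl
    obtain ⟨a, rest, hcons⟩ := List.exists_cons_of_ne_nil hv0
    have hs0 : PySem.List.sorted ((threads.filter (fun t => pvGet t "created" "" ≠ "")).map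
        (fun t => pvGet t "created" "")) (fun x => x) false ≠ [] := by
      rw [ne_eq, PySem.List.sorted_eq_nil_iff]; exact h0
    obtain ⟨h1, t1, hscons⟩ := List.exists_cons_of_ne_nil hs0
    have hminq : PySem.List.min? (((PySem.List.sorted threads
        (fun t => pvGet t "created" "") false).filter (fun t => pvGet t "created" "" ≠ "")).map
        (fun t => pvGet t "created" "")) (fun y => y) = some (rest.foldl min a) := by
      rw [hcons]; exact PySem.List.min?_id_cons a rest
    have hmaxq : PySem.List.max? (((PySem.List.sorted threads
        (fun t => pvGet t "created" "") false).filter (fun t => pvGet t "created" "" ≠ "")).map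
        (fun t => pvGet t "created" "")) (fun y => y) = some (rest.foldl max a) := by
      rw [hcons]; exact PySem.List.max?_id_cons a rest
    -- the running min is the head of A's sorted timestamp list
    have hm_eq : rest.foldl min a = h1 := by
      apply le_antisymm
      · exact PySem.List.min?_isMin hminq h1
          (hperm.mem_iff.mpr ((PySem.List.mem_sorted _ _ _ _).mp (hscons ▸ List.mem_cons_self)))
      · exact PySem.List.key_head_sorted_le _ _ hscons _
          (hperm.mem_iff.mp (PySem.List.min?_mem hminq))
    -- the running max is the last element of A's sorted timestamp list
    have hpair : (PySem.List.sorted ((threads.filter (fun t => pvGet t "created" "" ≠ "")).map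
        (fun t => pvGet t "created" "")) (fun x => x) false).Pairwise (· ≤ ·) :=
      PySem.List.sorted_pairwise _ _
    have hM_eq : rest.foldl max a = (PySem.List.sorted ((threads.filter
        (fun t => pvGet t "created" "" ≠ "")).map (fun t => pvGet t "created" ""))
        (fun x => x) false).getLast hs0 := by
      apply le_antisymm
      · exact pv_le_getLast hpair
          ((PySem.List.mem_sorted _ _ _ _).mpr (hperm.mem_iff.mp (PySem.List.max?_mem hmaxq))) hs0
      · exact PySem.List.max?_isMax hmaxq _
          (hperm.mem_iff.mpr ((PySem.List.mem_sorted _ _ _ _).mp (List.getLast_mem hs0)))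
    have hmn : (((PySem.List.sorted threads (fun t => pvGet t "created" "") false).filter
        (fun t => pvGet t "created" "" ≠ "")).map (fun t => pvGet t "created" "")).foldl
        (fun o ts => match o with
          | none => some ts | some l => if ts < l then some ts else some l) none
        = some h1 := by
      rw [hcons]
      simp only [List.foldl_cons]
      rw [pv_min_fold, hm_eq]
    have hmx : (((PySem.List.sorted threads (fun t => pvGet t "created" "") false).filter
        (fun t => pvGet t "created" "" ≠ "")).map (fun t => pvGet t "created" "")).foldl
        (fun o ts => match o with
          | none => some ts | some h => if h < ts then some ts else some h) none
        = some ((PySem.List.sorted ((threads.filter (fun t => pvGet t "created" "" ≠ "")).map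
            (fun t => pvGet t "created" "")) (fun x => x) false).getLast hs0) := by
      rw [hcons]
      simp only [List.foldl_cons]
      rw [pv_max_fold, hM_eq]
    have htr : time_range_py threads
        = h1 ++ " to " ++ (PySem.List.sorted ((threads.filter
            (fun t => pvGet t "created" "" ≠ "")).map (fun t => pvGet t "created" ""))
            (fun x => x) false).getLast hs0 := by
      simp only [time_range_py]
      rw [if_neg ht, if_neg h0]
      rw [PySem.List.pyGetD_neg_one _ "" hs0]
      have hhd : PySem.List.pyGetD (PySem.List.sorted ((threads.filter
          (fun t => pvGet t "created" "" ≠ "")).map (fun t => pvGet t "created" ""))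
          (fun x => x) false) 0 "" = h1 := by
        rw [hscons]; exact PySem.List.pyGetD_zero_cons _ _ _
      rw [hhd]
    rw [htr, hmn, hmx]
    apply pv_assemble
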